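-- pv_equiv track=rewrite | github.com/daashikaa/neural_networks | Practice/nntask2.py | bldr
-- ===== SOURCE A (Python) =====
-- def bldr(vertex, edges, path=None):
-- 	if path is None:
-- 		# список пройденных вершин
-- 		path = []
-- 	path.append(vertex)
-- 	# если детей нет, возвращаем имя вершины
-- 	if vertex not in edges or not edges[vertex]:
-- 		return f"{vertex}()"
-- 	# сортировка детей по порядку
-- 	children = sorted(edges[vertex], key=lambda x: x[0])
-- 	# рекурсивное построение представления для детей
-- 	children_repr = [bldr(child[1], edges, path[:]) for child in children]
-- 	return f"{vertex}({', '.join(children_repr)})"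
-- ===== SOURCE B (Python) =====
-- def bldr(vertex, edges, path=None):
--     # Emit tokens into one flat buffer in pre-order; join once at the end.
--     parts = []
--
--     def emit(v):
--         parts.append(v)
--         parts.append("(")
--         sep = ""
--         for _, child in sorted(edges.get(v, []), key=lambda x: x[0]):
--             parts.append(sep)
--             sep = ", "
--             emit(child)
--         parts.append(")")
--
--     emit(vertex)
--     return "".join(parts)
-- ===== Notes on version B (the rewrite author's own statement) =====
-- stated objective: alternative
-- what changed: Instead of recursively building each child's full string and joining them per node (and copying and appending to the dead `path` list at every call), B emits name/paren/separator tokens into one flat buffer during a single pre-order walk and joins the buffer once at the end; B does not mutate a caller-supplied `path` (return value is what is claimed equal).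
import Mathlib
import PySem

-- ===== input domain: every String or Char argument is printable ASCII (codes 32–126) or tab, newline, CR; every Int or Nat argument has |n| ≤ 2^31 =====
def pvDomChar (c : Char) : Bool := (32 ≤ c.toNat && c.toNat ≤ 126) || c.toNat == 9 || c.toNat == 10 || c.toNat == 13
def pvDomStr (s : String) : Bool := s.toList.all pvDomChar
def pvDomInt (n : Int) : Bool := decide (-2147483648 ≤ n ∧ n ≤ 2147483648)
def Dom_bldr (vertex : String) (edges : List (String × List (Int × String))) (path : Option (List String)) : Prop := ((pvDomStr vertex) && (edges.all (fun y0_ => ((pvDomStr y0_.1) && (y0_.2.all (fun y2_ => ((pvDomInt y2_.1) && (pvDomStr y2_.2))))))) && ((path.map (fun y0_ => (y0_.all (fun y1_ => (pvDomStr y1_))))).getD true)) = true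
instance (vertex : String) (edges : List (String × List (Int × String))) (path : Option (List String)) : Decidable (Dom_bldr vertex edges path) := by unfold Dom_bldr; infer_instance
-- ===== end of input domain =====

-- B replaces A's per-node child-string building (recursive join of child representations,
-- plus the dead `path` copying) with a single flat token buffer emitted in pre-order and
-- joined once at the end. Python A appends to a caller-supplied `path` list in place; B does
-- not — the equivalence proved here is about the RETURN value only.

-- ===== PORT A =====
-- Fueled transliteration of A's recursion; fuel edges.length+1 bounds the recursion depth
-- whenever the Python returns (under Pre_bldr no reachable cycle, depth ≤ #keys + 1).
def bldrA (edges : List (String × List (Int × String))) : Nat → String → Option (List String) → String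
  | 0, _, _ => ""                                   -- fuel guard; unreachable under Pre_bldr
  | fuel+1, vertex, path =>
    -- if path is None: path = [] ; path.append(vertex)
    let p : List String := (path.getD []) ++ [vertex]
    match (PySem.Dict.ofList edges).get? vertex with
    | none => vertex ++ "()"                        -- vertex not in edges
    | some cs =>
      if cs = [] then vertex ++ "()"                -- not edges[vertex]
      else
        let children := PySem.List.sorted cs (fun x => x.1)
        let childrenRepr := children.map (fun c => bldrA edges fuel c.2 (some p))  -- path[:] copy
        vertex ++ "(" ++ PySem.Str.join ", " childrenRepr ++ ")"

def bldr (vertex : String) (edges : List (String × List (Int × String))) (path : Option (List String)) : String :=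
  bldrA edges (edges.length + 1) vertex path

-- ===== PORT B =====
-- emit(v): append v, "(", then sep-prefixed children, then ")" to the flat buffer.
def emitB (edges : List (String × List (Int × String))) : Nat → String → List String → List String
  | 0, _, parts => parts                            -- fuel guard; unreachable under Pre_bldr
  | fuel+1, v, parts =>
    let parts := parts ++ [v] ++ ["("]
    let kids := PySem.List.sorted ((PySem.Dict.ofList edges).getD v []) (fun x => x.1)
    let st := kids.foldl (fun (st : List String × String) c =>
        (emitB edges fuel c.2 (st.1 ++ [st.2]), ", ")) (parts, "")
    st.1 ++ [")"]

def bldr_alt (vertex : String) (edges : List (String × List (Int × String))) (path : Option (List String)) : String :=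
  PySem.Str.join "" (emitB edges (edges.length + 1) vertex [])

-- ===== PRECONDITION & SPEC =====
def pvSuccs (edges : List (String × List (Int × String))) (v : String) : List String :=
  ((PySem.Dict.ofList edges).getD v []).map (·.2)
def pvStep (edges : List (String × List (Int × String))) (S : List String) : List String :=
  PySem.List.dedup (S ++ S.flatMap (pvSuccs edges))
def pvReach (edges : List (String × List (Int × String))) (S : List String) : List String :=
  (pvStep edges)^[edges.length + 2] S
-- Pre_: no vertex reachable from `vertex` lies on a cycle of the child graph — exactly the
-- inputs on which A's recursion (and B's) terminates; on a reachable cycle Python A raises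
-- RecursionError, so those inputs are excluded.
def Pre_bldr (vertex : String) (edges : List (String × List (Int × String))) (path : Option (List String)) : Prop :=
  ∀ v ∈ pvReach edges [vertex], v ∉ pvReach edges (pvSuccs edges v)
instance (vertex : String) (edges : List (String × List (Int × String))) (path : Option (List String)) : Decidable (Pre_bldr vertex edges path) := by unfold Pre_bldr; infer_instance

def pvWitness_bldr : String × (List (String × List (Int × String))) × Option (List String) :=
  ("a", [("a", [((1:Int), "b")])], none)

def Spec_bldr (vertex : String) (edges : List (String × List (Int × String))) (path : Option (List String)) (out : String) : Prop := out = bldr_alt vertex edges path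
instance (vertex : String) (edges : List (String × List (Int × String))) (path : Option (List String)) (out : String) : Decidable (Spec_bldr vertex edges path out) := by unfold Spec_bldr; infer_instance

-- ===== CLAIM (what is proved, stated in full; the proofs are below) =====
def Claim_equal_bldr : Prop := ∀ (vertex : String) (edges : List (String × List (Int × String))) (path : Option (List String)), Dom_bldr vertex edges path → Pre_bldr vertex edges path → Spec_bldr vertex edges path (bldr vertex edges path)

-- ===== LEMMAS AND PROOFS =====

-- String-level join facts (lifted from PySem.Chars via toList).
theorem pvJnil : PySem.Str.join "" ([] : List String) = "" := by
  rw [← String.toList_inj]; simp [PySem.Str.toList_join, PySem.Chars.join_nil]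

theorem pvJsing (sep x : String) : PySem.Str.join sep [x] = x := by
  rw [← String.toList_inj]; simp [PySem.Str.toList_join, PySem.Chars.join_singleton]

theorem pvJcc (sep x y : String) (r : List String) :
    PySem.Str.join sep (x :: y :: r) = x ++ sep ++ PySem.Str.join sep (y :: r) := by
  rw [← String.toList_inj]
  simp [PySem.Str.toList_join, PySem.Chars.join_cons_cons, String.toList_append]

theorem pvJcons (x : String) (xs : List String) :
    PySem.Str.join "" (x :: xs) = x ++ PySem.Str.join "" xs := by
  cases xs with
  | nil => rw [pvJnil, pvJsing]; simp
  | cons y ys =>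
    rw [pvJcc]
    rw [← String.toList_inj]; simp [String.toList_append]

theorem pvJapp (xs ys : List String) :
    PySem.Str.join "" (xs ++ ys) = PySem.Str.join "" xs ++ PySem.Str.join "" ys := by
  induction xs with
  | nil => simp [pvJnil]
  | cons x xs ih =>
    simp only [List.cons_append, pvJcons, ih]
    rw [← String.toList_inj]; simp [String.toList_append]

-- A's result does not depend on the (dead) path argument.
theorem bldrA_path (edges : List (String × List (Int × String))) :
    ∀ (fuel : Nat) (v : String) (p q : Option (List String)),
      bldrA edges fuel v p = bldrA edges fuel v q := by
  intro fuel
  induction fuel with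
  | zero => intro v p q; rfl
  | succ f ih =>
    intro v p q
    simp only [bldrA]
    cases (PySem.Dict.ofList edges).get? v with
    | none => rfl
    | some cs =>
      by_cases h : cs = []
      · simp [h]
      · simp only [h, if_false]
        have hm : (fun (c : Int × String) => bldrA edges f c.2 (some ((p.getD []) ++ [v])))
                = (fun (c : Int × String) => bldrA edges f c.2 (some ((q.getD []) ++ [v]))) :=
          funext fun c => ih c.2 _ _
        rw [hm]

-- The fold over the children emits exactly sep ++ join ", " of the child representations.
theorem fold_emit (edges : List (String × List (Int × String))) (f : Nat)
    (IH : ∀ (v : String) (parts : List String),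
      PySem.Str.join "" (emitB edges f v parts)
        = PySem.Str.join "" parts ++ bldrA edges f v none) :
    ∀ (rest : List (Int × String)) (c : Int × String) (parts : List String) (s : String),
      PySem.Str.join "" (((c :: rest).foldl (fun (st : List String × String) c =>
          (emitB edges f c.2 (st.1 ++ [st.2]), ", ")) (parts, s)).1)
        = PySem.Str.join "" parts ++ s
            ++ PySem.Str.join ", " ((c :: rest).map (fun c => bldrA edges f c.2 none)) := by
  intro rest
  induction rest with
  | nil =>
    intro c parts s
    simp only [List.foldl_cons, List.foldl_nil, List.map_cons, List.map_nil]
    rw [pvJsing, IH, pvJapp, pvJsing]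
  | cons c2 r2 ih =>
    intro c parts s
    simp only [List.foldl_cons] at ih ⊢
    rw [ih c2 (emitB edges f c.2 (parts ++ [s])) ", "]
    rw [IH, pvJapp, pvJsing]
    simp only [List.map_cons]
    rw [pvJcc]
    rw [← String.toList_inj]; simp [String.toList_append]

-- Main correspondence: B's emitter appends A's rendering to the buffer.
theorem emit_bldrA (edges : List (String × List (Int × String))) :
    ∀ (fuel : Nat) (v : String) (parts : List String),
      PySem.Str.join "" (emitB edges fuel v parts)
        = PySem.Str.join "" parts ++ bldrA edges fuel v none := by
  intro fuel
  induction fuel with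
  | zero =>
    intro v parts
    simp only [emitB, bldrA]
    rw [← String.toList_inj]; simp
  | succ f ih =>
    intro v parts
    have hs0 : (PySem.List.sorted ([] : List (Int × String)) (fun x => x.1)) = [] := by
      rw [PySem.List.sorted_eq_nil_iff]
    simp only [emitB, bldrA, PySem.Dict.getD_eq_get?_getD]
    cases hg : (PySem.Dict.ofList edges).get? v with
    | none =>
      simp only [Option.getD_none, hs0, List.foldl_nil]
      rw [pvJapp, pvJapp, pvJapp, pvJsing, pvJsing, pvJsing]
      rw [← String.toList_inj]; simp [String.toList_append]
    | some cs =>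
      by_cases h : cs = []
      · simp only [h, if_true, Option.getD_some, hs0, List.foldl_nil]
        rw [pvJapp, pvJapp, pvJapp, pvJsing, pvJsing, pvJsing]
        rw [← String.toList_inj]; simp [String.toList_append]
      · have hk : PySem.List.sorted cs (fun x => x.1) ≠ [] := by
          rw [Ne, PySem.List.sorted_eq_nil_iff]; exact h
        simp only [h, if_false, Option.getD_some]
        cases hks : PySem.List.sorted cs (fun x => x.1) with
        | nil => exact absurd hks hk
        | cons c rest =>
          rw [pvJapp, pvJsing]
          rw [fold_emit edges f ih rest c (parts ++ [v] ++ ["("]) ""]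
          have hmap : ((c :: rest).map (fun c => bldrA edges f c.2 (some ((Option.getD none []) ++ [v]))))
              = ((c :: rest).map (fun c => bldrA edges f c.2 none)) := by
            apply List.map_congr_left
            intro a _
            exact bldrA_path edges f a.2 _ _
          rw [hmap]
          rw [pvJapp, pvJapp, pvJsing, pvJsing]
          rw [← String.toList_inj]; simp [String.toList_append]

-- ===== VERDICT (by name: the statement is the Claim_ definition above) =====
theorem bldr_spec : Claim_equal_bldr := by
  intro vertex edges path _ _
  unfold Spec_bldr bldr bldr_alt
  rw [emit_bldrA edges (edges.length + 1) vertex [], pvJnil]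
  rw [bldrA_path edges (edges.length + 1) vertex path none]
  rw [← String.toList_inj]; simp
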